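-- pv_equiv track=rewrite | github.com/quarantin/imperial-probe-droid | botoptions.py | parse_modslots
-- ===== SOURCE A (Python) =====
-- MODSLOTS_OPTS = {
-- 	'sq':       1,
-- 	'square':   1,
-- 	'ar':       2,
-- 	'arrow':    2,
-- 	'di':       3,
-- 	'diamond':  3,
-- 	'tr':       4,
-- 	'triangle': 4,
-- 	'ci':       5,
-- 	'circle':   5,
-- 	'cr':       6,
-- 	'cross':    6,
-- }
--
-- def parse_modslots(args):
--
-- 	selected_modslots = []
-- 	args_cpy = list(args)
-- 	for arg in args_cpy:
-- 		if arg in MODSLOTS_OPTS: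
-- 			args.remove(arg)
-- 			modslot = MODSLOTS_OPTS[arg]
-- 			if modslot not in selected_modslots:
-- 				selected_modslots.append(modslot)
--
-- 	return selected_modslots
-- ===== SOURCE B (Python) =====
-- MODSLOTS_OPTS = {
-- 	'sq':       1,
-- 	'square':   1,
-- 	'ar':       2,
-- 	'arrow':    2,
-- 	'di':       3,
-- 	'diamond':  3,
-- 	'tr':       4,
-- 	'triangle': 4,
-- 	'ci':       5,
-- 	'circle':   5,
-- 	'cr':       6,
-- 	'cross':    6,
-- }
--
-- def parse_modslots(args):
-- 	# single pass: rebuild kept args, collect dedup'd slots via a seen-set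
-- 	kept = []
-- 	slots = []
-- 	seen = set()
-- 	for arg in args:
-- 		slot = MODSLOTS_OPTS.get(arg)
-- 		if slot is None:
-- 			kept.append(arg)
-- 		elif slot not in seen:
-- 			seen.add(slot)
-- 			slots.append(slot)
-- 	args[:] = kept
-- 	return slots
-- ===== Notes on version B (the rewrite author's own statement) =====
-- stated objective: alternative
-- what changed: Replaced the copy-then-remove loop (args.remove scans args once per matched token) by a single pass that rebuilds the kept args list and collects deduplicated slot ids via a seen-set, reassigning args[:] to preserve the in-place mutation.
import Mathlib
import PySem

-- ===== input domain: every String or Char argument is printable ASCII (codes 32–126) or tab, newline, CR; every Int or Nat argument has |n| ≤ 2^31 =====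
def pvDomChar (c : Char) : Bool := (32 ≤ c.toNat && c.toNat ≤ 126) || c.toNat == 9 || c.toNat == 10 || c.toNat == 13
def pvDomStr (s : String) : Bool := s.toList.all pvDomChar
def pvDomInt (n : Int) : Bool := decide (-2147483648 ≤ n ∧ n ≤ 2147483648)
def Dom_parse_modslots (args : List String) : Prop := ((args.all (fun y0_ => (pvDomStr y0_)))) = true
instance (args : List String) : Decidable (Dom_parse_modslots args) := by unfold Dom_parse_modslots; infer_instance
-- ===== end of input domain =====

-- B: one pass with a seen-set instead of copy-then-remove (A also mutates args in place;
-- B reproduces that mutation in Python; the equivalence proved here is about the RETURN value).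
-- ===== PORT A =====
def MODSLOTS_OPTS : PySem.Dict String Int := PySem.Dict.ofList
  [("sq", 1), ("square", 1), ("ar", 2), ("arrow", 2), ("di", 3), ("diamond", 3),
   ("tr", 4), ("triangle", 4), ("ci", 5), ("circle", 5), ("cr", 6), ("cross", 6)]

-- one iteration of A's loop: state = (args being mutated, selected_modslots)
def pvStepA (st : List String × List Int) (arg : String) : List String × List Int :=
  match PySem.Dict.get? MODSLOTS_OPTS arg with
  | some modslot =>
      -- args.remove(arg): never fails in A (arg came from a copy of args), getD is the total form
      ((PySem.List.remove? st.1 arg).getD st.1,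
       if modslot ∈ st.2 then st.2 else st.2 ++ [modslot])
  | none => st

def parse_modslots (args : List String) : List Int :=
  (args.foldl pvStepA (args, [])).2

-- ===== PORT B =====
-- one iteration of B's loop: state = (kept, slots, seen)
def pvStepB (st : List String × List Int × PySem.Set Int) (arg : String) :
    List String × List Int × PySem.Set Int :=
  match PySem.Dict.get? MODSLOTS_OPTS arg with
  | none => (st.1 ++ [arg], st.2.1, st.2.2)
  | some slot =>
      if slot ∈ st.2.2 then st
      else (st.1, st.2.1 ++ [slot], PySem.Set.add st.2.2 slot)

def parse_modslots_alt (args : List String) : List Int :=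
  (args.foldl pvStepB ([], [], PySem.Set.empty)).2.1

-- ===== PRECONDITION & SPEC =====
def Spec_parse_modslots (args : List String) (out : List Int) : Prop := out = parse_modslots_alt args
instance (args : List String) (out : List Int) : Decidable (Spec_parse_modslots args out) := by unfold Spec_parse_modslots; infer_instance

-- ===== CLAIM (what is proved, stated in full; the proofs are below) =====
def Claim_equal_parse_modslots : Prop := ∀ (args : List String), Dom_parse_modslots args → Spec_parse_modslots args (parse_modslots args)

-- ===== LEMMAS AND PROOFS =====

-- ===== VERDICT (by name: the statement is the Claim_ definition above) =====
-- invariant: if seen and slots have the same members, the two folds produce the same slot list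
theorem pv_fold_eq (args : List String) :
    ∀ (ar kept : List String) (slots : List Int) (seen : PySem.Set Int),
      (∀ x : Int, x ∈ seen ↔ x ∈ slots) →
      (args.foldl pvStepA (ar, slots)).2 = (args.foldl pvStepB (kept, slots, seen)).2.1 := by
  induction args with
  | nil => intro ar kept slots seen _; rfl
  | cons a rest ih =>
      intro ar kept slots seen hseen
      simp only [List.foldl_cons, pvStepA, pvStepB]
      cases h : PySem.Dict.get? MODSLOTS_OPTS a with
      | none =>
          dsimp only
          exact ih ar (kept ++ [a]) slots seen hseen
      | some v =>
          dsimp only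
          by_cases hv : v ∈ slots
          · rw [if_pos hv, if_pos ((hseen v).mpr hv)]
            exact ih _ kept slots seen hseen
          · rw [if_neg hv, if_neg (fun hc => hv ((hseen v).mp hc))]
            refine ih _ kept (slots ++ [v]) (PySem.Set.add seen v) (fun x => ?_)
            simp [PySem.Set.mem_add, hseen x, or_comm]

theorem parse_modslots_spec : Claim_equal_parse_modslots := by
  intro args _
  unfold Spec_parse_modslots parse_modslots parse_modslots_alt
  exact pv_fold_eq args args [] [] PySem.Set.empty (by simp [PySem.Set.empty])
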